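-- pv_equiv track=rewrite | github.com/cedadev/nappy | nappy/na_file/na_file.py | _checkForBlankLines
-- ===== SOURCE A (Python) =====
-- def _checkForBlankLines(datalines):
--     """
--     Searches for empty lines in the middle of the data section and raises
--     as error if found. It ignores empty lines at the end of the file but
--     strips them out before returning a list of lines for reading.
--     """
--     empties = None
--     count = 0
--     rtlines = []
--     for line in datalines:
--         if line.strip() == "":
--             empties = 1
--         else:
--             if empties == 1:   # If data line found after empty line then raise
--                 raise Exception("Empty line found in data section at line: " + str(count))
--             else:
--                 rtlines.append(line)
--         count = count + 1
--     return rtlines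
-- ===== SOURCE B (Python) =====
-- def _checkForBlankLines(datalines):
--     """
--     Strip trailing blank lines by scanning from the back; any blank line
--     remaining in the head is an interior blank and is an error.
--     """
--     rev = list(reversed(datalines))
--     while rev and rev[0].strip() == "":
--         rev.pop(0)
--     head = list(reversed(rev))
--     for idx, line in enumerate(head):
--         if line.strip() == "":
--             raise Exception("Empty line found in data section at line: " + str(idx))
--     return head
-- ===== Notes on version B (the rewrite author's own statement) =====
-- stated objective: alternative
-- what changed: B drops trailing blanks by a back-to-front scan of the reversed list and then checks the remaining head for blanks, instead of A's forward accumulator loop with an 'empties' flag.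
import Mathlib
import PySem

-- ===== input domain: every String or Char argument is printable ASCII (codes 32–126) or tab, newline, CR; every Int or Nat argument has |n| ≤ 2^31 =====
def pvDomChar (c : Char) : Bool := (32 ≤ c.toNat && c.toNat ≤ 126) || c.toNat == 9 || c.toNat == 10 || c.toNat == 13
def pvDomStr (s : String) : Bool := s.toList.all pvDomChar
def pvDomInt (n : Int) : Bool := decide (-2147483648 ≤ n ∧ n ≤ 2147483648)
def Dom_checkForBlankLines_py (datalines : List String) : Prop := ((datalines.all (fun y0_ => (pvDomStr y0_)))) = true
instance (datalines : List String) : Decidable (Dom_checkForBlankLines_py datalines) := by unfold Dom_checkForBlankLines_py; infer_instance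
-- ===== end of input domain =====

-- B drops trailing blank lines by a back-to-front scan and then checks the head for blanks,
-- instead of A's forward loop with an 'empties' flag; same return value on all non-raising inputs.

-- ===== PORT A =====
-- the loop of A: state = (empties flag, rtlines accumulator); the raise branch
-- (data line after an empty line) returns the accumulator, unreachable under Pre_.
def pvA_go : List String → Bool → List String → List String
  | [], _, rt => rt
  | l :: rest, empties, rt =>
    if PySem.Str.strip l = "" then pvA_go rest true rt
    else if empties then rt          -- Python: raise Exception(...); excluded by Pre_
    else pvA_go rest empties (rt ++ [l])

def checkForBlankLines_py (datalines : List String) : List String :=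
  pvA_go datalines false []

-- ===== PORT B =====
-- the while-pop loop of B on the reversed list
def pvB_drop : List String → List String
  | [] => []
  | l :: rest => if PySem.Str.strip l = "" then pvB_drop rest else l :: rest

def checkForBlankLines_py_alt (datalines : List String) : List String :=
  let head := (pvB_drop datalines.reverse).reverse
  if head.any (fun l => PySem.Str.strip l == "") then []   -- Python: raise Exception(...); excluded by Pre_
  else head

-- ===== PRECONDITION & SPEC =====
-- Pre_: exactly the inputs on which A returns normally — every line after the first
-- blank line is blank too (blank lines occur only as a trailing block).
def Pre_checkForBlankLines_py (datalines : List String) : Prop :=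
  ((datalines.dropWhile (fun l => !(PySem.Str.strip l == ""))).all
    (fun l => PySem.Str.strip l == "")) = true
instance (datalines : List String) : Decidable (Pre_checkForBlankLines_py datalines) := by
  unfold Pre_checkForBlankLines_py; infer_instance

def pvWitness_checkForBlankLines_py : List String := ["a", "b", " ", ""]

def Spec_checkForBlankLines_py (datalines : List String) (out : List String) : Prop := out = checkForBlankLines_py_alt datalines
instance (datalines : List String) (out : List String) : Decidable (Spec_checkForBlankLines_py datalines out) := by unfold Spec_checkForBlankLines_py; infer_instance

-- ===== CLAIM (what is proved, stated in full; the proofs are below) =====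
def Claim_equal_checkForBlankLines_py : Prop := ∀ (datalines : List String), Dom_checkForBlankLines_py datalines → Pre_checkForBlankLines_py datalines → Spec_checkForBlankLines_py datalines (checkForBlankLines_py datalines)

-- ===== LEMMAS AND PROOFS =====

-- A's loop with the flag set returns the accumulator once only blanks remain
theorem pvA_go_blank (xs : List String) (rt : List String)
    (h : ∀ l ∈ xs, PySem.Str.strip l = "") : pvA_go xs true rt = rt := by
  induction xs with
  | nil => rfl
  | cons x xs ih =>
      simp only [pvA_go, h x (by simp)]
      exact ih (fun l hl => h l (by simp [hl]))

-- A's loop on nonblank-prefix ++ blank-suffix appends exactly the prefix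
theorem pvA_go_split (t d rt : List String)
    (ht : ∀ l ∈ t, ¬ PySem.Str.strip l = "")
    (hd : ∀ l ∈ d, PySem.Str.strip l = "") :
    pvA_go (t ++ d) false rt = rt ++ t := by
  induction t generalizing rt with
  | nil =>
      simp only [List.nil_append, List.append_nil]
      cases d with
      | nil => rfl
      | cons x xs =>
          simp only [pvA_go, hd x (by simp)]
          exact pvA_go_blank xs rt (fun l hl => hd l (by simp [hl]))
  | cons x t ih =>
      have hx : ¬ PySem.Str.strip x = "" := ht x (by simp)
      simp only [List.cons_append, pvA_go, if_neg hx, if_neg (Bool.false_ne_true)]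
      rw [ih _ (fun l hl => ht l (List.mem_cons_of_mem _ hl)), List.append_assoc]
      rfl

-- B's pop loop skips a leading all-blank block
theorem pvB_drop_append (xs ys : List String)
    (h : ∀ l ∈ xs, PySem.Str.strip l = "") :
    pvB_drop (xs ++ ys) = pvB_drop ys := by
  induction xs with
  | nil => rfl
  | cons x xs ih =>
      simp only [List.cons_append, pvB_drop, h x (by simp)]
      exact ih (fun l hl => h l (by simp [hl]))

-- B's pop loop is the identity on a list of nonblank lines
theorem pvB_drop_nonblank (xs : List String)
    (h : ∀ l ∈ xs, ¬ PySem.Str.strip l = "") : pvB_drop xs = xs := by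
  cases xs with
  | nil => rfl
  | cons x xs => simp only [pvB_drop, if_neg (h x (by simp))]

-- ===== VERDICT (by name: the statement is the Claim_ definition above) =====
theorem checkForBlankLines_py_spec : Claim_equal_checkForBlankLines_py := by
  intro datalines _ hpre
  unfold Spec_checkForBlankLines_py
  set p : String → Bool := fun l => !(PySem.Str.strip l == "") with hp
  have hsplit : datalines.takeWhile p ++ datalines.dropWhile p = datalines :=
    List.takeWhile_append_dropWhile
  set t := datalines.takeWhile p with htdef
  set d := datalines.dropWhile p with hddef
  have ht : ∀ l ∈ t, ¬ PySem.Str.strip l = "" := by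
    intro l hl
    have := List.mem_takeWhile_imp hl
    simpa [hp] using this
  have hd : ∀ l ∈ d, PySem.Str.strip l = "" := by
    intro l hl
    have := (List.all_eq_true.mp hpre) l hl
    simpa using this
  have hA : checkForBlankLines_py datalines = t := by
    unfold checkForBlankLines_py
    rw [← hsplit]
    simpa using pvA_go_split t d [] ht hd
  have hB : checkForBlankLines_py_alt datalines = t := by
    unfold checkForBlankLines_py_alt
    have hrev : datalines.reverse = d.reverse ++ t.reverse := by
      rw [← hsplit, List.reverse_append]
    have hdr : pvB_drop datalines.reverse = t.reverse := by
      rw [hrev, pvB_drop_append _ _ (fun l hl => hd l (by simpa using hl))]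
      exact pvB_drop_nonblank _ (fun l hl => ht l (by simpa using hl))
    have hany : t.any (fun l => PySem.Str.strip l == "") = false := by
      simp only [List.any_eq_false]
      intro l hl
      simpa using ht l hl
    simp [hdr, hany]
  rw [hA, hB]
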